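-- pv_equiv track=rewrite | github.com/Isio-19/TraitementAutomatique | TP1/dict.py | wordTransform
-- ===== SOURCE A (Python) =====
-- def wordTransform(word: str, caps: bool, punc: bool):
--     word = word.replace("\n", "")
--
--     if caps:
--         word = word.lower()
--
--     if punc:
--         punctuation = '!"$%&\'()*+,-./:;<=>?[\\]^_`{|}~'
--         for i in punctuation:
--             word = word.replace(i, "")
--
--
--     return word
-- ===== SOURCE B (Python) =====
-- PUNCT = set('!"$%&\'()*+,-./:;<=>?[\\]^_`{|}~')
--
-- def wordTransform(word: str, caps: bool, punc: bool):
--     # One fused pass over the characters with an accumulator, instead of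
--     # A's staged whole-string passes (replace, lower, 31 replaces).
--     out = []
--     for c in word:
--         if c == '\n':
--             continue
--         if caps:
--             c = c.lower()
--         if punc and c in PUNCT:
--             continue
--         out.append(c)
--     return ''.join(out)
-- ===== Notes on version B (the rewrite author's own statement) =====
-- stated objective: alternative
-- what changed: Replaces A's staged whole-string passes (a newline replace, a full lower(), then 31 successive replace() scans, one per punctuation character) with ONE fused per-character loop over the input with an accumulator, dropping newlines, lowercasing each character, and skipping punctuation via a set; trades A's few C-level string passes for a single explicit Python-level pass.
import Mathlib
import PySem

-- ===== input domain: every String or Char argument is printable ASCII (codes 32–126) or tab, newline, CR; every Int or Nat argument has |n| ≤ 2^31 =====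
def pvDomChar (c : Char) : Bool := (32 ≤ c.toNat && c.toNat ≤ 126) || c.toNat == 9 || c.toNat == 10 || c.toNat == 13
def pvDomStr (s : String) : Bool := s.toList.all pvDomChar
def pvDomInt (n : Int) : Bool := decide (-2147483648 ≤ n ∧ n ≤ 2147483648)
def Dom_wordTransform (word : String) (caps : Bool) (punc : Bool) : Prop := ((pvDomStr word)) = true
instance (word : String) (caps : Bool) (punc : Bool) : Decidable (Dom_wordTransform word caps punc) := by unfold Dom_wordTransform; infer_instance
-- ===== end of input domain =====

-- B fuses A's staged whole-string passes (newline replace, lower(), 31 punctuation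
-- replace() scans) into one per-character pass with an accumulator.


-- ===== PORT A =====
-- punctuation = '!"$%&\'()*+,-./:;<=>?[\\]^_`{|}~'
def pvPunctA : String := "!\"$%&'()*+,-./:;<=>?[\\]^_`{|}~"

def wordTransform (word : String) (caps : Bool) (punc : Bool) : String :=
  let w1 := PySem.Str.replace word "\n" ""
  let w2 := if caps then PySem.Str.lower w1 else w1
  if punc then
    pvPunctA.toList.foldl (fun w i => PySem.Str.replace w (String.ofList [i]) "") w2
  else w2

-- ===== PORT B =====
-- PUNCT = set('!"$%&\'()*+,-./:;<=>?[\\]^_`{|}~')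
def pvPUNCT : PySem.Set Char := PySem.Set.ofList "!\"$%&'()*+,-./:;<=>?[\\]^_`{|}~".toList

-- the loop body of B: None = skipped character, some c' = character appended to out
def pvStep (caps : Bool) (punc : Bool) (c : Char) : Option Char :=
  if c == '\n' then none
  else
    let c' := if caps then PySem.Chars.lowerChar c else c
    if punc && pvPUNCT.contains c' then none else some c'

def wordTransform_alt (word : String) (caps : Bool) (punc : Bool) : String :=
  String.ofList (word.toList.filterMap (pvStep caps punc))

-- ===== PRECONDITION & SPEC =====
def Spec_wordTransform (word : String) (caps : Bool) (punc : Bool) (out : String) : Prop := out = wordTransform_alt word caps punc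
instance (word : String) (caps : Bool) (punc : Bool) (out : String) : Decidable (Spec_wordTransform word caps punc out) := by unfold Spec_wordTransform; infer_instance

-- ===== CLAIM (what is proved, stated in full; the proofs are below) =====
def Claim_equal_wordTransform : Prop := ∀ (word : String) (caps : Bool) (punc : Bool), Dom_wordTransform word caps punc → Spec_wordTransform word caps punc (wordTransform word caps punc)

-- ===== LEMMAS AND PROOFS =====

-- replace.go with a single-char pattern and empty replacement is a filter
theorem replace_go_single (c : Char) (fuel : Nat) (l acc : List Char)
    (h : l.length ≤ fuel) :
    PySem.Chars.replace.go [c] [] fuel l acc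
      = acc.reverse ++ l.filter (fun a => !(a == c)) := by
  induction l generalizing fuel acc with
  | nil =>
    cases fuel <;> simp [PySem.Chars.replace.go]
  | cons x t ih =>
    cases fuel with
    | zero => simp at h
    | succ n =>
      simp only [List.length_cons, Nat.succ_le_succ_iff] at h
      by_cases hx : x = c
      · subst hx
        simp [PySem.Chars.replace.go, List.isPrefixOf, ih n acc h]
      · have : ([c].isPrefixOf (x :: t)) = false := by
          simp [List.isPrefixOf]; exact fun hc => (hx hc.symm).elim
        simp [PySem.Chars.replace.go, this, ih n (x :: acc) h, hx]

theorem replace_single (c : Char) (s : List Char) :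
    PySem.Chars.replace s [c] [] = s.filter (fun a => !(a == c)) := by
  simpa using replace_go_single c s.length s []

-- the whole punctuation fold is one filter over the input
theorem foldl_replace_filter (ps : List Char) (s : List Char) :
    ps.foldl (fun w i => PySem.Chars.replace w [i] []) s
      = s.filter (fun a => !(ps.contains a)) := by
  induction ps generalizing s with
  | nil => simp
  | cons p ps ih =>
    rw [List.foldl_cons, replace_single, ih, List.filter_filter]
    apply List.filter_congr
    intro a _
    by_cases h : a = p <;> simp [h]

theorem foldl_replace_str (ps : List Char) (s : String) :
    (ps.foldl (fun w i => PySem.Str.replace w (String.ofList [i]) "") s).toList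
      = ps.foldl (fun w i => PySem.Chars.replace w [i] []) s.toList := by
  induction ps generalizing s with
  | nil => rfl
  | cons p ps ih =>
    simp only [List.foldl_cons, ih, PySem.Str.toList_replace, String.toList_ofList]
    rfl

theorem pvPUNCT_contains (a : Char) : pvPUNCT.contains a = pvPunctA.toList.contains a := by
  have h := PySem.Set.mem_ofList pvPunctA.toList a
  simp only [pvPUNCT, pvPunctA] at *
  by_cases hm : a ∈ ("!\"$%&'()*+,-./:;<=>?[\\]^_`{|}~" : String).toList <;>
    simp_all [PySem.Set.contains]

-- B's fused pass equals A's staged passes on the character list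
theorem filterMap_step (caps punc : Bool) (l : List Char) :
    l.filterMap (pvStep caps punc)
      = (fun m => if punc then m.filter (fun a => !(pvPUNCT.contains a)) else m)
        ((fun f => if caps then f.map PySem.Chars.lowerChar else f)
          (l.filter (fun a => !(a == '\n')))) := by
  induction l with
  | nil => cases caps <;> cases punc <;> simp
  | cons x t ih =>
    rw [List.filterMap_cons, ih]
    by_cases hx : x = '\n'
    · subst hx; cases caps <;> cases punc <;> simp [pvStep]
    · cases caps <;> cases punc <;>
        by_cases hp : PySem.Chars.lowerChar x ∈ pvPUNCT <;>
        by_cases hq : x ∈ pvPUNCT <;>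
        simp [pvStep, hx, hp, hq]

-- ===== VERDICT (by name: the statement is the Claim_ definition above) =====
theorem wordTransform_spec : Claim_equal_wordTransform := by
  intro word caps punc _
  unfold Spec_wordTransform wordTransform wordTransform_alt
  apply String.ext
  show _root_.String.toList _ = _
  rw [String.toList_ofList, filterMap_step]
  have hnl : (PySem.Str.replace word "\n" "").toList
      = word.toList.filter (fun a => !(a == '\n')) := by
    rw [PySem.Str.toList_replace]
    simpa using replace_single '\n' word.toList
  cases punc with
  | false =>
    cases caps with
    | false => simpa using hnl
    | true => simp [PySem.Str.lower, PySem.Chars.lower, hnl]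
  | true =>
    cases caps with
    | false =>
      simp only [if_false, Bool.false_eq_true, if_true]
      rw [foldl_replace_str, foldl_replace_filter, hnl]
      apply List.filter_congr
      intro a _
      rw [pvPUNCT_contains]
    | true =>
      simp only [if_true]
      rw [foldl_replace_str, foldl_replace_filter]
      simp only [PySem.Str.toList_lower, hnl, PySem.Chars.lower]
      apply List.filter_congr
      intro a _
      rw [pvPUNCT_contains]
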